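-- pv_equiv track=rewrite | github.com/alexhunsley/tiny-tower | source/python_version/notation_tests.py | mirror_places_within_token
-- ===== SOURCE A (Python) =====
-- STAGE_SYMBOLS = "1234567890ET"  # positions: 1..12 (10=0, 11=E, 12=T)
--
-- def symbol_to_index(sym):
--     try:
--         idx = STAGE_SYMBOLS.index(sym)
--     except ValueError:
--         return None
--     return idx + 1  # 1-based
--
-- def index_to_symbol(pos):
--     # pos is 1..12
--     if 1 <= pos <= len(STAGE_SYMBOLS):
--         return STAGE_SYMBOLS[pos - 1]
--     return ""
--
-- def mirror_places_within_token(token, stage):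
--     if token == "x":
--         return "x"
--     places = []
--     for ch in token:
--         i = symbol_to_index(ch)
--         if not i:
--             continue
--         j = stage + 1 - i  # position reversal within the stage
--         places.append(j)
--     places.sort()
--     return "".join(index_to_symbol(p) for p in places)
-- ===== SOURCE B (Python) =====
-- STAGE_SYMBOLS = "1234567890ET"  # positions: 1..12 (10=0, 11=E, 12=T)
--
-- def symbol_to_index(sym):
--     try:
--         idx = STAGE_SYMBOLS.index(sym)
--     except ValueError:
--         return None
--     return idx + 1  # 1-based
--
-- def index_to_symbol(pos):
--     # pos is 1..12
--     if 1 <= pos <= len(STAGE_SYMBOLS):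
--         return STAGE_SYMBOLS[pos - 1]
--     return ""
--
-- def mirror_places_within_token(token, stage):
--     # Counting/bucket approach: tally mirrored positions, then emit 1..12 in order.
--     if token == "x":
--         return "x"
--     counts = {}
--     for ch in token:
--         i = symbol_to_index(ch)
--         if not i:
--             continue
--         j = stage + 1 - i
--         counts[j] = counts.get(j, 0) + 1
--     return "".join(index_to_symbol(p) * counts.get(p, 0) for p in range(1, 13))
-- ===== Notes on version B (the rewrite author's own statement) =====
-- stated objective: alternative
-- what changed: Replaces collect-then-comparison-sort with a counting/bucket pass: mirrored positions are tallied in a dict and the output is emitted by scanning the fixed 12-position alphabet in order.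
import Mathlib
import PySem

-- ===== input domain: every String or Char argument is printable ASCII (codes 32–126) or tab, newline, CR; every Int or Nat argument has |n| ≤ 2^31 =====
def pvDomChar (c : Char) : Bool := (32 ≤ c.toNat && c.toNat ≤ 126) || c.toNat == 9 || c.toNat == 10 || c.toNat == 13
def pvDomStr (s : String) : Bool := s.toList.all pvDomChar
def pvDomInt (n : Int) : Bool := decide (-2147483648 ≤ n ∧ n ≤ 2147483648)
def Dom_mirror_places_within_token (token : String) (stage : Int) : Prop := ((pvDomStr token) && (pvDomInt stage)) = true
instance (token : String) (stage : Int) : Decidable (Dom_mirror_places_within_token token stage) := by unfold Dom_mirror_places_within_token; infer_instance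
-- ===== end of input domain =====

-- B replaces A's collect-and-sort with a counting (bucket) pass over the fixed 12-symbol alphabet; return values proved equal on all inputs.

-- ===== PORT A =====
def pvStageSymbols : List Char := "1234567890ET".toList

def symbol_to_index (sym : Char) : Option Int :=
  match PySem.List.index? pvStageSymbols sym with
  | none => none
  | some idx => some ((idx : Int) + 1)

def index_to_symbol (pos : Int) : List Char :=
  if 1 ≤ pos ∧ pos ≤ (pvStageSymbols.length : Int) then
    match PySem.List.pyGet? pvStageSymbols (pos - 1) with
    | some c => [c]
    | none => []
  else []

def mirror_places_within_token (token : String) (stage : Int) : String :=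
  if token == "x" then "x"
  else
    let places := token.toList.foldl (fun acc ch =>
      match symbol_to_index ch with
      | none => acc
      | some i => acc ++ [stage + 1 - i]) []
    String.ofList ((PySem.List.sorted places (fun x => x) false).flatMap index_to_symbol)

-- ===== PORT B =====
def mirror_places_within_token_alt (token : String) (stage : Int) : String :=
  if token == "x" then "x"
  else
    let counts : PySem.Dict Int Int := token.toList.foldl (fun d ch =>
      match symbol_to_index ch with
      | none => d
      | some i => d.insert (stage + 1 - i) (d.getD (stage + 1 - i) 0 + 1)) PySem.Dict.empty
    String.ofList ((PySem.List.pyRange 1 13 1).flatMap (fun p =>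
      PySem.List.pyRepeat (index_to_symbol p) (counts.getD p 0)))

-- ===== PRECONDITION & SPEC =====
def Spec_mirror_places_within_token (token : String) (stage : Int) (out : String) : Prop := out = mirror_places_within_token_alt token stage
instance (token : String) (stage : Int) (out : String) : Decidable (Spec_mirror_places_within_token token stage out) := by unfold Spec_mirror_places_within_token; infer_instance

-- ===== CLAIM (what is proved, stated in full; the proofs are below) =====
def Claim_equal_mirror_places_within_token : Prop := ∀ (token : String) (stage : Int), Dom_mirror_places_within_token token stage → Spec_mirror_places_within_token token stage (mirror_places_within_token token stage)

-- ===== LEMMAS AND PROOFS =====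

-- A's loop builds exactly the filterMap of mirrored indices
def pvPlaces (token : String) (stage : Int) : List Int :=
  token.toList.filterMap (fun ch => (symbol_to_index ch).map (fun i => stage + 1 - i))

theorem pvPlaces_eq (cs : List Char) (stage : Int) (acc : List Int) :
    cs.foldl (fun acc ch =>
      match symbol_to_index ch with
      | none => acc
      | some i => acc ++ [stage + 1 - i]) acc
    = acc ++ cs.filterMap (fun ch => (symbol_to_index ch).map (fun i => stage + 1 - i)) := by
  induction cs generalizing acc with
  | nil => simp
  | cons c cs ih =>
    simp only [List.foldl_cons, List.filterMap_cons]
    cases h : symbol_to_index c <;> simp [ih]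

-- B's dict fold is a counter over the same places list
theorem pvCounts_eq (cs : List Char) (stage : Int) (d : PySem.Dict Int Int) :
    cs.foldl (fun d ch =>
      match symbol_to_index ch with
      | none => d
      | some i => d.insert (stage + 1 - i) (d.getD (stage + 1 - i) 0 + 1)) d
    = (cs.filterMap (fun ch => (symbol_to_index ch).map (fun i => stage + 1 - i))).foldl
        (fun d j => d.insert j (d.getD j 0 + 1)) d := by
  induction cs generalizing d with
  | nil => rfl
  | cons c cs ih =>
    simp only [List.foldl_cons, List.filterMap_cons]
    cases h : symbol_to_index c <;> simp [ih]

-- dropping elements mapped to [] from a flatMap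
theorem flatMap_filter_of_nil {α β : Type} (f : α → List β) (q : α → Bool) (l : List α)
    (h : ∀ x, q x = false → f x = []) :
    l.flatMap f = (l.filter q).flatMap f := by
  induction l with
  | nil => rfl
  | cons x l ih =>
    by_cases hx : q x = true
    · simp [hx, ih]
    · simp only [Bool.not_eq_true] at hx
      simp [hx, h x hx, ih]

-- count in a bucket concatenation over a duplicate-free index list
theorem count_flatMap_replicate (c : Int → Nat) (R : List Int) (hR : R.Nodup) (a : Int) :
    (R.flatMap (fun p => List.replicate (c p) p)).count a = if a ∈ R then c a else 0 := by
  induction R with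
  | nil => simp
  | cons r R ih =>
    simp only [List.nodup_cons] at hR
    by_cases h : a = r
    · subst h
      simp [List.count_append, ih hR.2, hR.1]
    · simp [List.count_append, List.count_replicate, ih hR.2, h, Ne.symm h]

-- a bucket concatenation over a sorted index list is sorted
theorem pairwise_flatMap_replicate (c : Int → Nat) (R : List Int) (hR : R.Pairwise (· ≤ ·)) :
    (R.flatMap (fun p => List.replicate (c p) p)).Pairwise (· ≤ ·) := by
  induction R with
  | nil => simp
  | cons r R ih =>
    simp only [List.pairwise_cons] at hR
    simp only [List.flatMap_cons]
    rw [List.pairwise_append]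
    refine ⟨List.pairwise_replicate.2 (Or.inr le_rfl), ih hR.2, ?_⟩
    intro x hx y hy
    rw [List.eq_of_mem_replicate hx]
    rcases List.mem_flatMap.1 hy with ⟨p, hp, hyp⟩
    rw [List.eq_of_mem_replicate hyp]
    exact hR.1 p hp

def pvInR (p : Int) : Bool := decide (1 ≤ p ∧ p ≤ 12)

theorem sym_nil_of_not_inR (p : Int) (h : pvInR p = false) : index_to_symbol p = [] := by
  simp only [pvInR, decide_eq_false_iff_not] at h
  simp only [index_to_symbol, pvStageSymbols]
  rw [if_neg]
  intro ⟨h1, h2⟩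
  exact h ⟨h1, by simpa using h2⟩

-- a block of n equal positions contributes its symbol n times
theorem flatMap_replicate_eq_pyRepeat (f : Int → List Char) (a : Int) (n : Nat) :
    (List.replicate n a).flatMap f = PySem.List.pyRepeat (f a) (n : Int) := by
  have key : ∀ m : Nat, (List.replicate m a).flatMap f = List.flatten (List.replicate m (f a)) := by
    intro m
    induction m with
    | zero => simp
    | succ m ih => simp [List.replicate_succ, ih]
  rw [key n]
  simp [PySem.List.pyRepeat]

-- the sorted in-range places equal the canonical bucket concatenation
theorem sorted_filter_eq_canon (P : List Int) :
    (PySem.List.sorted P (fun x => x) false).filter pvInR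
      = (PySem.List.pyRange 1 13 1).flatMap (fun p => List.replicate (P.count p) p) := by
  have hperm : List.Perm ((PySem.List.sorted P (fun x => x) false).filter pvInR)
      ((PySem.List.pyRange 1 13 1).flatMap (fun p => List.replicate (P.count p) p)) := by
    rw [List.perm_iff_count]
    intro a
    rw [count_flatMap_replicate _ _ (PySem.List.nodup_pyRange_one 1 13)]
    have hperm := PySem.List.sorted_perm P (fun x => x) false
    have hmem : a ∈ PySem.List.pyRange 1 13 1 ↔ (1 ≤ a ∧ a ≤ 12) := by
      rw [PySem.List.mem_pyRange_one]; omega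
    by_cases h : 1 ≤ a ∧ a ≤ 12
    · rw [List.count_filter (show pvInR a = true by simp [pvInR]; omega),
          hperm.count_eq, if_pos (hmem.2 h)]
    · rw [if_neg (fun hc => h (hmem.1 hc)), List.count_eq_zero]
      intro hc
      have hin := List.of_mem_filter hc
      simp only [pvInR, decide_eq_true_eq] at hin
      exact h hin
  exact List.Perm.eq_of_pairwise' (r := (· ≤ · : Int → Int → Prop))
    ((PySem.List.sorted_pairwise P (fun x => x)).filter _)
    (pairwise_flatMap_replicate _ _ (List.Pairwise.imp le_of_lt (PySem.List.pairwise_lt_pyRange_one 1 13)))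
    hperm

-- ===== VERDICT (by name: the statement is the Claim_ definition above) =====
theorem mirror_places_within_token_spec : Claim_equal_mirror_places_within_token := by
  intro token stage _
  show mirror_places_within_token token stage = mirror_places_within_token_alt token stage
  unfold mirror_places_within_token mirror_places_within_token_alt
  by_cases hx : token == "x"
  · simp [hx]
  · simp only [hx]
    rw [pvPlaces_eq, pvCounts_eq, List.nil_append]
    congr 1
    set P := token.toList.filterMap (fun ch => (symbol_to_index ch).map (fun i => stage + 1 - i)) with hP
    rw [flatMap_filter_of_nil index_to_symbol pvInR _ sym_nil_of_not_inR,
        sorted_filter_eq_canon, List.flatMap_assoc]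
    refine congrArg String.ofList (List.flatMap_congr ?_)
    intro p hp
    rw [PySem.Dict.getD_foldl_insert_add_one]
    have h0 : (PySem.Dict.empty : PySem.Dict Int Int).getD p 0 = 0 := rfl
    rw [h0, zero_add, flatMap_replicate_eq_pyRepeat]
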